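-- pv_equiv track=rewrite | github.com/besthong/Algo | 코딜리티 - LongestPassword.py | solution
-- ===== SOURCE A (Python) =====
-- def solution(S):
--     S=S.split()
--     max_len = -1
--     for i in S:
--         if i.isalnum():
--             letters = sum(c.isalpha() for c in i) #알파벳 문자의 개수
--             digits = sum(c.isdigit() for c in i) #숫자의 개수
--
--             if letters % 2 == 0 and digits % 2 == 1:
--                 max_len = max(max_len, len(i))
--     return max_len
-- ===== SOURCE B (Python) =====
-- def solution(S):
--     words = sorted(S.split(), key=len, reverse=True)
--     for w in words:
--         if w.isalnum():
--             if sum(c.isalpha() for c in w) % 2 == 0 and sum(c.isdigit() for c in w) % 2 == 1: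
--                 return len(w)
--     return -1
-- ===== Notes on version B (the rewrite author's own statement) =====
-- stated objective: alternative
-- what changed: Instead of scanning all words while tracking a running maximum, B sorts the words by length in descending order and returns the length of the first valid word, with -1 if none qualifies.
import Mathlib
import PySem

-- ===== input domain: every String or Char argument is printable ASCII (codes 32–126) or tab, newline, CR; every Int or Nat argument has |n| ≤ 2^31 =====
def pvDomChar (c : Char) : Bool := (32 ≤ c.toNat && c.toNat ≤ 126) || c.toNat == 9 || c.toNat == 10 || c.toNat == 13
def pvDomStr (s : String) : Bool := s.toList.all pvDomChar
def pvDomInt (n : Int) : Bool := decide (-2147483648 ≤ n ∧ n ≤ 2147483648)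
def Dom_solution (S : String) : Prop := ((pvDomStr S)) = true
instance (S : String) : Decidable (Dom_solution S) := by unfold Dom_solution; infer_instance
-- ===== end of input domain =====

-- B sorts the words by length descending and returns the first valid word's length (alternative, same result).

-- the per-word validity test shared verbatim by both Pythons:
-- i.isalnum() and sum(c.isalpha() for c in i) % 2 == 0 and sum(c.isdigit() for c in i) % 2 == 1
def pvValid (w : String) : Bool :=
  PySem.Str.strIsalnum w &&
    (w.toList.countP PySem.Chars.isalpha) % 2 == 0 &&
    (w.toList.countP PySem.Chars.isdigit) % 2 == 1

-- ===== PORT A =====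
def solution (S : String) : Int :=
  (PySem.Str.split₀ S).foldl
    (fun max_len i => if pvValid i then max max_len (PySem.Str.len i : Int) else max_len)
    (-1)

-- ===== PORT B =====
-- for w in words: if valid, return len(w); fall through to -1
def pvFirstValid : List String → Int
  | [] => -1
  | w :: rest => if pvValid w then (PySem.Str.len w : Int) else pvFirstValid rest

def solution_alt (S : String) : Int :=
  pvFirstValid (PySem.List.sorted (PySem.Str.split₀ S) (fun w => PySem.Str.len w) true)

-- ===== PRECONDITION & SPEC =====
def Spec_solution (S : String) (out : Int) : Prop := out = solution_alt S
instance (S : String) (out : Int) : Decidable (Spec_solution S out) := by unfold Spec_solution; infer_instance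

-- ===== CLAIM (what is proved, stated in full; the proofs are below) =====
def Claim_equal_solution : Prop := ∀ (S : String), Dom_solution S → Spec_solution S (solution S)

-- ===== LEMMAS AND PROOFS =====

-- A's loop body
def pvStep (m : Int) (i : String) : Int :=
  if pvValid i then max m (PySem.Str.len i : Int) else m

theorem pvStep_rcomm : ∀ (m : Int) (a b : String),
    pvStep (pvStep m a) b = pvStep (pvStep m b) a := by
  intro m a b
  unfold pvStep
  split_ifs <;> simp only [PySem.Str.len_eq, max_assoc] <;> rw [max_comm ((a.toList.length : Int))]

-- A's fold is permutation-invariant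
theorem pvFold_perm {l₁ l₂ : List String} (p : l₁.Perm l₂) :
    l₁.foldl pvStep (-1) = l₂.foldl pvStep (-1) := by
  haveI : RightCommutative pvStep := ⟨fun m a b => pvStep_rcomm m a b⟩
  exact p.foldl_eq (-1)

-- folding over a list of words no longer than the accumulator leaves it unchanged
theorem pvFold_const (l : List String) (a : Int)
    (h : ∀ x ∈ l, (PySem.Str.len x : Int) ≤ a) : l.foldl pvStep a = a := by
  induction l with
  | nil => rfl
  | cons w rest ih =>
    have hw := h w (by simp)
    have : pvStep a w = a := by
      unfold pvStep; split_ifs <;> simp only [PySem.Str.len_eq] at * <;> omega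
    rw [List.foldl_cons, this]
    exact ih (fun x hx => h x (by simp [hx]))

-- on a length-descending list, A's max-fold equals B's first-hit scan
theorem pvFold_sorted (l : List String)
    (h : l.Pairwise (fun a b => PySem.Str.len b ≤ PySem.Str.len a)) :
    l.foldl pvStep (-1) = pvFirstValid l := by
  induction l with
  | nil => rfl
  | cons w rest ih =>
    rcases List.pairwise_cons.mp h with ⟨hw, hrest⟩
    by_cases hv : pvValid w
    · have h1 : pvStep (-1) w = (PySem.Str.len w : Int) := by
        unfold pvStep; rw [if_pos hv]; simp only [PySem.Str.len_eq]; omega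
      rw [List.foldl_cons, h1, pvFold_const]
      · simp [pvFirstValid, hv]
      · intro x hx
        exact_mod_cast hw x hx
    · have h1 : pvStep (-1) w = -1 := by unfold pvStep; rw [if_neg hv]
      rw [List.foldl_cons, h1, ih hrest]
      simp [pvFirstValid, hv]

-- ===== VERDICT (by name: the statement is the Claim_ definition above) =====
theorem solution_spec : Claim_equal_solution := by
  intro S _
  unfold Spec_solution solution solution_alt
  have hperm : (PySem.List.sorted (PySem.Str.split₀ S) (fun w => PySem.Str.len w) true).Perm
      (PySem.Str.split₀ S) := PySem.List.sorted_perm _ _ _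
  calc (PySem.Str.split₀ S).foldl
        (fun max_len i => if pvValid i then max max_len (PySem.Str.len i : Int) else max_len) (-1)
      = (PySem.Str.split₀ S).foldl pvStep (-1) := rfl
    _ = (PySem.List.sorted (PySem.Str.split₀ S) (fun w => PySem.Str.len w) true).foldl
        pvStep (-1) := (pvFold_perm hperm).symm
    _ = pvFirstValid (PySem.List.sorted (PySem.Str.split₀ S) (fun w => PySem.Str.len w) true) :=
        pvFold_sorted _ (PySem.List.sorted_pairwise_rev _ _)
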